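-- pv_equiv track=rewrite | github.com/AedanStewart/UltimateTicTacToe | simple.py | str_to_bitboard
-- ===== SOURCE A (Python) =====
-- WIN_PATTERNS = [
--     0b111000000,
--     0b000111000,
--     0b000000111,
--     0b100100100,
--     0b010010010,
--     0b001001001,
--     0b100010001,
--     0b001010100,
-- ]
--
-- def subboard_has_win(subboard: int):
--     for pattern in WIN_PATTERNS:
--         if (subboard & pattern) == pattern:
--             return True
--     return False
--
-- def get_subboard(board: tuple[int, int, int, int], subboard: int):
--     x_board, o_board, _, _ = board
--     return (
--         (x_board >> (81 - ((subboard + 1) * 9))) & ((1 << 9) - 1),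
--         (o_board >> (81 - ((subboard + 1) * 9))) & ((1 << 9) - 1),
--     )
--
-- def str_to_bitboard(board: str):
--     x_board, o_board, x_wins, o_wins = 0, 0, 0, 0
--     for i, token in enumerate(board):
--         if token == "X":
--             x_board |= 1 << (80 - i)
--         elif token == "O":
--             o_board |= 1 << (80 - i)
--     for i in range(9):
--         subboard = get_subboard((x_board, o_board, 0, 0), i)
--         x_wins |= subboard_has_win(subboard[0]) << (8 - i)
--         o_wins |= subboard_has_win(subboard[1]) << (8 - i)
--     return (x_board, o_board, x_wins, o_wins)
-- ===== SOURCE B (Python) =====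
-- WIN_PATTERNS = [
--     0b111000000,
--     0b000111000,
--     0b000000111,
--     0b100100100,
--     0b010010010,
--     0b001001001,
--     0b100010001,
--     0b001010100,
-- ]
--
-- # All 9-bit subboard values containing at least one winning pattern,
-- # precomputed once as a lookup table at module load.
-- WINNING = frozenset(
--     v for v in range(512)
--     if any(v & p == p for p in WIN_PATTERNS)
-- )
--
--
-- def str_to_bitboard(board: str):
--     x_board, o_board = 0, 0
--     for i, token in enumerate(board):
--         if token == "X":
--             x_board |= 1 << (80 - i)
--         elif token == "O":
--             o_board |= 1 << (80 - i)
--     x_wins, o_wins = 0, 0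
--     for i in range(9):
--         shift = 81 - (i + 1) * 9
--         xs = (x_board >> shift) & 511
--         os = (o_board >> shift) & 511
--         x_wins = (x_wins << 1) | (xs in WINNING)
--         o_wins = (o_wins << 1) | (os in WINNING)
--     return (x_board, o_board, x_wins, o_wins)
-- ===== Notes on version B (the rewrite author's own statement) =====
-- stated objective: alternative
-- what changed: B keeps A's character packing loop verbatim (same ValueError behaviour) but replaces A's 72 repeated win-pattern scans through the get_subboard/subboard_has_win helpers by 18 lookups in a frozenset of all winning 9-bit values precomputed once at module load, building the win words by shift-accumulation instead of OR-ing positioned bits.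
import Mathlib
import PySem

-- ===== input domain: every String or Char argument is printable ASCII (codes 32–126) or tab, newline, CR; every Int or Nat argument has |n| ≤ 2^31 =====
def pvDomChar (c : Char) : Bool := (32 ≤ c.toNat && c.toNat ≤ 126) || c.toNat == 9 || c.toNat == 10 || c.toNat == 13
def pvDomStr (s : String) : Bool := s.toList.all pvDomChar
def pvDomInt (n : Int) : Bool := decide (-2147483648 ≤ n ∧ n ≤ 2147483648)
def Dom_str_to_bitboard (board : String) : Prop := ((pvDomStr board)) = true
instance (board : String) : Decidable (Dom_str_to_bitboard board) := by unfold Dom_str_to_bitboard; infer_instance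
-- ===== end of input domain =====

-- B keeps A's character packing loop verbatim (so the same ValueError behaviour on marks past
-- index 80 stays outside Pre_), but replaces A's 72 repeated win-pattern scans through the
-- get_subboard/subboard_has_win helpers by 18 lookups in a table of all winning 9-bit values
-- precomputed once, with the win words built by shift-accumulation (objective: alternative).

-- ===== PORT A =====
def WIN_PATTERNS : List Nat :=
  [0b111000000, 0b000111000, 0b000000111, 0b100100100,
   0b010010010, 0b001001001, 0b100010001, 0b001010100]

def subboard_has_win (subboard : Nat) : Bool :=
  -- loop with early 'return True' over WIN_PATTERNS
  WIN_PATTERNS.any (fun pattern => subboard &&& pattern == pattern)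

def get_subboard (board : Nat × Nat × Nat × Nat) (subboard : Nat) : Nat × Nat :=
  ((board.1 >>> (81 - (subboard + 1) * 9)) &&& ((1 <<< 9) - 1),
   (board.2.1 >>> (81 - (subboard + 1) * 9)) &&& ((1 <<< 9) - 1))

-- body of A's first loop (over enumerate(board)); boards stay in ℕ (Python ints here are ≥ 0)
def packStep (st : Nat × Nat) (p : Int × Char) : Nat × Nat :=
  if p.2 = 'X' then (st.1 ||| (1 <<< (80 - p.1).toNat), st.2)
  else if p.2 = 'O' then (st.1, st.2 ||| (1 <<< (80 - p.1).toNat))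
  else st

-- body of A's second loop (over range(9))
def winStep (xb ob : Nat) (w : Nat × Nat) (i : Nat) : Nat × Nat :=
  let sb := get_subboard (xb, ob, 0, 0) i
  (w.1 ||| ((if subboard_has_win sb.1 then 1 else 0) <<< (8 - i)),
   w.2 ||| ((if subboard_has_win sb.2 then 1 else 0) <<< (8 - i)))

def str_to_bitboard (board : String) : Int × Int × Int × Int :=
  let xo := (PySem.List.enumerate board.toList 0).foldl packStep (0, 0)
  let wins := (List.range 9).foldl (winStep xo.1 xo.2) (0, 0)
  ((xo.1 : Int), (xo.2 : Int), (wins.1 : Int), (wins.2 : Int))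

-- ===== PORT B =====
-- WINNING: every 9-bit value matching at least one pattern, precomputed once
def WINNING : PySem.Set Nat :=
  PySem.Set.ofList ((List.range 512).filter
    (fun v => WIN_PATTERNS.any (fun p => v &&& p == p)))

-- B's packing loop is kept verbatim from A's source (see Source B), so its step is packStep above.
-- body of B's second loop (over range(9)): inline shift/mask extraction, table lookup,
-- shift-accumulated win words
def altWinStep (xb ob : Nat) (w : Nat × Nat) (i : Nat) : Nat × Nat :=
  let shift := 81 - (i + 1) * 9
  let xs := (xb >>> shift) &&& 511
  let os := (ob >>> shift) &&& 511
  ((w.1 <<< 1) ||| (if WINNING.contains xs then 1 else 0),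
   (w.2 <<< 1) ||| (if WINNING.contains os then 1 else 0))

def str_to_bitboard_alt (board : String) : Int × Int × Int × Int :=
  let xo := (PySem.List.enumerate board.toList 0).foldl packStep (0, 0)
  let wins := (List.range 9).foldl (altWinStep xo.1 xo.2) (0, 0)
  ((xo.1 : Int), (xo.2 : Int), (wins.1 : Int), (wins.2 : Int))

-- ===== PRECONDITION & SPEC =====
-- Both Pythons raise ValueError (negative shift count) exactly when an 'X' or 'O' occurs at
-- index ≥ 81; Pre_ excludes those inputs (other characters beyond index 80 are harmless).
def Pre_str_to_bitboard (board : String) : Prop :=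
  ((board.toList.drop 81).all (fun c => !(c == 'X') && !(c == 'O'))) = true
instance (board : String) : Decidable (Pre_str_to_bitboard board) := by
  unfold Pre_str_to_bitboard; infer_instance

def pvWitness_str_to_bitboard : String := "XOX      O X     O"

def Spec_str_to_bitboard (board : String) (out : Int × Int × Int × Int) : Prop :=
  out = str_to_bitboard_alt board
instance (board : String) (out : Int × Int × Int × Int) : Decidable (Spec_str_to_bitboard board out) := by
  unfold Spec_str_to_bitboard; infer_instance

-- ===== CLAIM (what is proved, stated in full; the proofs are below) =====
def Claim_equal_str_to_bitboard : Prop := ∀ (board : String), Dom_str_to_bitboard board → Pre_str_to_bitboard board → Spec_str_to_bitboard board (str_to_bitboard board)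

-- ===== LEMMAS AND PROOFS =====

theorem pv_lor_add {k a b : Nat} (ha : 2 ^ k ∣ a) (hb : b < 2 ^ k) :
    a ||| b = a + b := by
  obtain ⟨q, rfl⟩ := ha
  apply Nat.eq_of_testBit_eq
  intro j
  rw [Nat.testBit_lor, Nat.testBit_two_pow_mul_add q hb j]
  have h0 : (2 ^ k * q).testBit j = if j < k then false else q.testBit (j - k) := by
    simpa using Nat.testBit_two_pow_mul_add q (b := 0) (i := k) (by positivity) j
  rw [h0]
  split
  · simp
  · rename_i h
    have : b.testBit j = false := Nat.testBit_lt_two_pow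
      (lt_of_lt_of_le hb (Nat.pow_le_pow_right (by norm_num) (by omega)))
    simp [this]

theorem foldl_pair {ι : Type} (l : List ι) (f g : Nat → ι → Nat) :
    ∀ (a b : Nat), l.foldl (fun p j => (f p.1 j, g p.2 j)) (a, b) = (l.foldl f a, l.foldl g b) := by
  induction l with
  | nil => intro a b; rfl
  | cons x l ih => intro a b; simp only [List.foldl_cons]; exact ih (f a x) (g b x)

theorem rAcc (N : Nat) : ∀ (c : Nat → Nat) (a : Nat),
    (List.range N).foldl (fun w j => 2 * w + c j) a
      = a * 2 ^ N + (List.range N).foldl (fun w j => 2 * w + c j) 0 := by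
  induction N with
  | zero => intro c a; simp
  | succ N ih =>
    intro c a
    rw [List.range_succ, List.foldl_append, List.foldl_append,
      List.foldl_cons, List.foldl_nil, List.foldl_cons, List.foldl_nil,
      ih c a, ih c 0]
    rw [pow_succ]
    ring

theorem worFold (N : Nat) : ∀ (b : Nat → Nat) (x : Nat), (∀ j, b j ≤ 1) → 2 ^ N ∣ x →
    (List.range N).foldl (fun w j => w ||| (b j <<< (N - 1 - j))) x
      = x + (List.range N).foldl (fun w j => 2 * w + b j) 0 := by
  induction N with
  | zero => intro b x _ _; simp
  | succ N ih =>
    intro b x hb hx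
    rw [List.range_succ_eq_map, List.foldl_cons, List.foldl_map]
    have hb0 : b 0 <<< N = b 0 * 2 ^ N := by rw [Nat.shiftLeft_eq]
    have hlt : b 0 * 2 ^ N < 2 ^ (N + 1) := by
      have := hb 0
      have h2 : (0:Nat) < 2 ^ N := by positivity
      calc b 0 * 2 ^ N ≤ 1 * 2 ^ N := Nat.mul_le_mul_right _ this
        _ < 2 ^ (N + 1) := by rw [one_mul, pow_succ]; omega
    have hfirst : x ||| (b 0 <<< (N + 1 - 1 - 0)) = x + b 0 * 2 ^ N := by
      rw [show N + 1 - 1 - 0 = N from by omega, hb0, pv_lor_add hx hlt]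
    rw [hfirst]
    have hcongr : (List.range N).foldl (fun w j => w ||| (b j.succ <<< (N + 1 - 1 - j.succ)))
        (x + b 0 * 2 ^ N)
        = (List.range N).foldl (fun w j => w ||| ((fun j => b (j + 1)) j <<< (N - 1 - j)))
        (x + b 0 * 2 ^ N) := by
      refine PySem.List.foldl_congr_mem _ _ _ _ ?_
      intro acc j _
      rw [show N + 1 - 1 - j.succ = N - 1 - j from by omega]
    rw [hcongr, ih (fun j => b (j + 1)) (x + b 0 * 2 ^ N) (fun j => hb (j + 1))
      (dvd_add (dvd_trans (pow_dvd_pow 2 (Nat.le_succ N)) hx) (dvd_mul_left _ _))]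
    rw [List.foldl_cons, List.foldl_map, rAcc N (fun j => b (j + 1)) (2 * 0 + b 0)]
    ring

theorem worFold9 (b : Nat → Nat) (hb : ∀ j, b j ≤ 1) :
    (List.range 9).foldl (fun w j => w ||| (b j <<< (8 - j))) 0
      = (List.range 9).foldl (fun w j => 2 * w + b j) 0 := by
  have h := worFold 9 b 0 hb (dvd_zero _)
  rw [Nat.zero_add] at h
  exact h

set_option maxRecDepth 10000 in
theorem winning_contains (s : Nat) (hs : s < 512) :
    WINNING.contains s = subboard_has_win s := by
  have hnd : ((List.range 512).filter
      (fun v => WIN_PATTERNS.any (fun p => v &&& p == p))).Nodup :=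
    List.Nodup.filter _ List.nodup_range
  have hW : WINNING = (List.range 512).filter
      (fun v => WIN_PATTERNS.any (fun p => v &&& p == p)) := by
    rw [WINNING, PySem.Set.ofList_eq_self_of_nodup _ hnd]
  rw [hW]
  show List.contains _ s = _
  by_cases h : subboard_has_win s = true
  · rw [h]
    rw [List.contains_iff_mem, List.mem_filter]
    exact ⟨List.mem_range.mpr hs, h⟩
  · rw [Bool.not_eq_true] at h
    rw [h]
    rw [← Bool.not_eq_true, List.contains_iff_mem, List.mem_filter]
    rintro ⟨-, hp⟩
    have : subboard_has_win s = true := hp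
    rw [h] at this
    exact Bool.false_ne_true this

-- the extracted subboard value is masked to 9 bits, hence < 512
theorem extract_lt (b0 i : Nat) : (b0 >>> (81 - (i + 1) * 9)) &&& 511 < 512 := by
  have : (511 : Nat) = 2 ^ 9 - 1 := by norm_num
  rw [this, Nat.and_two_pow_sub_one_eq_mod]
  exact Nat.mod_lt _ (by norm_num)

-- shift-accumulating a sequence of bits equals summing them
theorem shiftAcc_eq_sum (b : Nat → Nat) (hb : ∀ j, b j ≤ 1) :
    (List.range 9).foldl (fun w j => (w <<< 1) ||| b j) 0
      = (List.range 9).foldl (fun w j => 2 * w + b j) 0 := by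
  refine PySem.List.foldl_congr_mem _ _ _ _ ?_
  intro acc j _
  have h1 : acc <<< 1 = 2 * acc := by rw [Nat.shiftLeft_eq]; ring
  rw [h1]
  exact pv_lor_add (k := 1) ⟨acc, by norm_num⟩ (by have := hb j; omega)

-- one board word: A's OR-of-shifted-win-bits equals B's shift-accumulated table lookups
theorem win_word_eq (b0 : Nat) :
    (List.range 9).foldl (fun w i => w |||
        ((if subboard_has_win ((b0 >>> (81 - (i + 1) * 9)) &&& ((1 <<< 9) - 1)) then 1 else 0)
          <<< (8 - i))) 0
      = (List.range 9).foldl (fun w i => (w <<< 1) |||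
        (if WINNING.contains ((b0 >>> (81 - (i + 1) * 9)) &&& 511) then 1 else 0)) 0 := by
  have hmask : ((1 : Nat) <<< 9) - 1 = 511 := by decide
  have hbits : ∀ i : Nat,
      (if WINNING.contains ((b0 >>> (81 - (i + 1) * 9)) &&& 511) then 1 else 0)
        = (if subboard_has_win ((b0 >>> (81 - (i + 1) * 9)) &&& ((1 <<< 9) - 1)) then (1:Nat) else 0) := by
    intro i
    rw [hmask, winning_contains _ (extract_lt b0 i)]
  calc (List.range 9).foldl (fun w i => w |||
        ((if subboard_has_win ((b0 >>> (81 - (i + 1) * 9)) &&& ((1 <<< 9) - 1)) then 1 else 0)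
          <<< (8 - i))) 0
      = (List.range 9).foldl (fun w i => 2 * w +
          (if subboard_has_win ((b0 >>> (81 - (i + 1) * 9)) &&& ((1 <<< 9) - 1)) then 1 else 0)) 0 :=
        worFold9 _ (fun j => by split <;> omega)
    _ = (List.range 9).foldl (fun w i => (w <<< 1) |||
          (if WINNING.contains ((b0 >>> (81 - (i + 1) * 9)) &&& 511) then 1 else 0)) 0 := by
        rw [shiftAcc_eq_sum _ (fun j => by split <;> omega)]
        refine (PySem.List.foldl_congr_mem _ _ _ _ ?_).symm
        intro acc j _
        rw [hbits j]

-- the two win loops agree for any pair of packed boards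
theorem wins_eq (xb ob : Nat) :
    (List.range 9).foldl (winStep xb ob) (0, 0)
      = (List.range 9).foldl (altWinStep xb ob) (0, 0) := by
  have eA : winStep xb ob = fun (w : Nat × Nat) i =>
      (w.1 ||| ((if subboard_has_win ((xb >>> (81 - (i + 1) * 9)) &&& ((1 <<< 9) - 1)) then 1 else 0)
          <<< (8 - i)),
       w.2 ||| ((if subboard_has_win ((ob >>> (81 - (i + 1) * 9)) &&& ((1 <<< 9) - 1)) then 1 else 0)
          <<< (8 - i))) := by
    funext w i; rfl
  have eB : altWinStep xb ob = fun (w : Nat × Nat) i =>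
      ((w.1 <<< 1) ||| (if WINNING.contains ((xb >>> (81 - (i + 1) * 9)) &&& 511) then 1 else 0),
       (w.2 <<< 1) ||| (if WINNING.contains ((ob >>> (81 - (i + 1) * 9)) &&& 511) then 1 else 0)) := by
    funext w i; rfl
  rw [eA, eB,
    foldl_pair (List.range 9)
      (fun w i => w ||| ((if subboard_has_win ((xb >>> (81 - (i + 1) * 9)) &&& ((1 <<< 9) - 1)) then 1 else 0) <<< (8 - i)))
      (fun w i => w ||| ((if subboard_has_win ((ob >>> (81 - (i + 1) * 9)) &&& ((1 <<< 9) - 1)) then 1 else 0) <<< (8 - i))) 0 0,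
    foldl_pair (List.range 9)
      (fun w i => (w <<< 1) ||| (if WINNING.contains ((xb >>> (81 - (i + 1) * 9)) &&& 511) then 1 else 0))
      (fun w i => (w <<< 1) ||| (if WINNING.contains ((ob >>> (81 - (i + 1) * 9)) &&& 511) then 1 else 0)) 0 0,
    win_word_eq xb, win_word_eq ob]



theorem main_eq (board : String) :
    str_to_bitboard board = str_to_bitboard_alt board := by
  simp only [str_to_bitboard, str_to_bitboard_alt, wins_eq]

-- ===== VERDICT (by name: the statement is the Claim_ definition above) =====
theorem str_to_bitboard_spec : Claim_equal_str_to_bitboard := by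
  intro board _ _
  exact main_eq board
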